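-- pv_equiv track=rewrite | github.com/chenfanyue/algo-in-python | easy/1796 · 差为K的数对数量.py | k_difference
-- ===== SOURCE A (Python) =====
-- from typing import (
--     List,
-- )
--
-- def k_difference(nums: List[int], target: int) -> int:
--     # write your code here
--     if len(nums) < 2:
--         return 0
--
--     cnt = 0
--     for former in range(len(nums) - 1):
--         for latter in range(former + 1, len(nums)):
--             if abs(nums[former] - nums[latter]) == target:
--                 cnt += 1
--
--     return cnt
-- ===== SOURCE B (Python) =====
-- def k_difference(nums, target):
--     if target < 0:
--         return 0
--     cnt = 0
--     seen = {}
--     for x in nums: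
--         if target == 0:
--             cnt += seen.get(x, 0)
--         else:
--             cnt += seen.get(x - target, 0) + seen.get(x + target, 0)
--         seen[x] = seen.get(x, 0) + 1
--     return cnt
-- ===== Notes on version B (the rewrite author's own statement) =====
-- stated objective: faster
-- what changed: Replaced the quadratic all-pairs double loop by a single pass that keeps a hash map of counts of seen values and adds the counts of num-target and num+target (num itself when target is 0).
import Mathlib
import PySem

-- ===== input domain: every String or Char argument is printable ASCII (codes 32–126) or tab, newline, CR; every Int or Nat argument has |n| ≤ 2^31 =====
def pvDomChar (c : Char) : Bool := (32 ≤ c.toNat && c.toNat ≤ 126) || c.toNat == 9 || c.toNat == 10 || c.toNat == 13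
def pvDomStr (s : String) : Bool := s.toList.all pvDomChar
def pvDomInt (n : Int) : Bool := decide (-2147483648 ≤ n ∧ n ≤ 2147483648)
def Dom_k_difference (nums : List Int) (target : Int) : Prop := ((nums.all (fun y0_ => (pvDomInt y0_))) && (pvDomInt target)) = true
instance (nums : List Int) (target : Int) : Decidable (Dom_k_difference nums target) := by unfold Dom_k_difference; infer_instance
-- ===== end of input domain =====

-- B replaces A's quadratic all-pairs double loop by a single pass over a hash map of
-- counts of already-seen values (objective: faster, asymptotically).

-- ===== PORT A =====
def k_difference (nums : List Int) (target : Int) : Int :=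
  if (nums.length : Int) < 2 then 0
  else
    (PySem.List.pyRange 0 ((nums.length : Int) - 1) 1).foldl
      (fun cnt former =>
        (PySem.List.pyRange (former + 1) (nums.length : Int) 1).foldl
          (fun cnt latter =>
            if |PySem.List.pyGetD nums former 0 - PySem.List.pyGetD nums latter 0| = target
            then cnt + 1 else cnt)
          cnt)
      0

-- ===== PORT B =====
def k_difference_alt (nums : List Int) (target : Int) : Int :=
  if target < 0 then 0
  else
    (nums.foldl
      (fun (st : PySem.Dict Int Int × Int) x =>
        let cnt := st.2 +
          (if target = 0 then st.1.getD x 0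
           else st.1.getD (x - target) 0 + st.1.getD (x + target) 0)
        (st.1.insert x (st.1.getD x 0 + 1), cnt))
      (PySem.Dict.empty, 0)).2

-- ===== PRECONDITION & SPEC =====
def Spec_k_difference (nums : List Int) (target : Int) (out : Int) : Prop := out = k_difference_alt nums target
instance (nums : List Int) (target : Int) (out : Int) : Decidable (Spec_k_difference nums target out) := by unfold Spec_k_difference; infer_instance

-- ===== CLAIM (what is proved, stated in full; the proofs are below) =====
def Claim_equal_k_difference : Prop := ∀ (nums : List Int) (target : Int), Dom_k_difference nums target → Spec_k_difference nums target (k_difference nums target)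

-- ===== LEMMAS AND PROOFS =====

-- number of y in s with |x - y| = t
def pvCM (t x : Int) (s : List Int) : Int := (s.countP (fun y => decide (|x - y| = t)) : Int)

-- reference count of matching pairs (i < j), recursing on the first element
def pvF (t : Int) : List Int → Int
  | [] => 0
  | x :: xs => pvCM t x xs + pvF t xs

theorem pvCM_nil (t x : Int) : pvCM t x [] = 0 := rfl

theorem pvCM_append (t x : Int) (s₁ s₂ : List Int) :
    pvCM t x (s₁ ++ s₂) = pvCM t x s₁ + pvCM t x s₂ := by
  simp [pvCM, List.countP_append]

theorem pvCM_neg (t x : Int) (s : List Int) (ht : t < 0) : pvCM t x s = 0 := by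
  simp only [pvCM]
  rw [List.countP_eq_zero.mpr]
  · rfl
  · intro y _
    simp only [decide_eq_true_eq]
    intro h
    have := abs_nonneg (x - y)
    omega

theorem pvCM_sym (t x y : Int) : |x - y| = t ↔ |y - x| = t := by
  rw [abs_sub_comm]

theorem pvF_append_singleton (t : Int) (s : List Int) (x : Int) :
    pvF t (s ++ [x]) = pvF t s + pvCM t x s := by
  induction s with
  | nil => simp [pvF, pvCM]
  | cons y s ih =>
    simp only [List.cons_append, pvF, ih, pvCM_append]
    have : pvCM t y [x] = pvCM t x [y] := by
      simp [pvCM, List.countP, List.countP.go, pvCM_sym t y x, abs_sub_comm x y]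
    rw [this]
    have : pvCM t x (y :: s) = pvCM t x [y] + pvCM t x s := by
      have := pvCM_append t x [y] s
      simpa using this
    rw [this]
    ring

-- when t < 0 there are no matching pairs
theorem pvF_neg (t : Int) (s : List Int) (ht : t < 0) : pvF t s = 0 := by
  induction s with
  | nil => rfl
  | cons x xs ih => simp [pvF, ih, pvCM_neg t x xs ht]

-- counting fold = countP
theorem foldl_count (t x : Int) (s : List Int) (init : Int) :
    s.foldl (fun acc y => if |x - y| = t then acc + 1 else acc) init = init + pvCM t x s := by
  induction s generalizing init with
  | nil => simp [pvCM]
  | cons y s ih =>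
    simp only [List.foldl_cons, ih]
    by_cases h : |x - y| = t
    · have : pvCM t x (y :: s) = 1 + pvCM t x s := by
        simp [pvCM, h]; ring
      rw [this]; simp [h]; ring
    · have : pvCM t x (y :: s) = pvCM t x s := by
        simp [pvCM, h]
      rw [this]; simp [h]

-- counter lookups compute pvCM
theorem count_decompose (t x : Int) (s : List Int) (ht : 0 ≤ t) :
    pvCM t x s = if t = 0 then (s.count x : Int)
                 else (s.count (x - t) : Int) + (s.count (x + t) : Int) := by
  induction s with
  | nil => simp [pvCM]
  | cons y s ih =>
    have hm : (|x - y| = t) ↔ (y = x - t ∨ y = x + t) := by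
      constructor
      · intro h
        rcases abs_eq ht |>.mp h with h' | h' <;> omega
      · intro h
        rcases h with h' | h' <;> [skip; skip] <;>
          · subst h'
            rw [abs_eq ht]
            omega
    have hc : pvCM t x (y :: s) = (if |x - y| = t then 1 else 0) + pvCM t x s := by
      simp [pvCM, List.countP_cons]
      split_ifs <;> simp_all <;> ring
    by_cases h0 : t = 0
    · subst h0
      simp only [] at ih ⊢
      rw [hc, ih]
      by_cases hy : y = x
      · subst hy
        simp [List.count_cons]
        ring
      · have : ¬ (|x - y| = 0) := by
          intro h; exact hy (by apply (hm.mp h).elim <;> omega)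
        simp [List.count_cons, this]
        exact hy
    · have ht' : 0 < t := lt_of_le_of_ne ht (Ne.symm h0)
      simp only [if_neg h0] at ih ⊢
      rw [hc, ih]
      by_cases h1 : y = x - t <;> by_cases h2 : y = x + t
      · omega
      · have hmx : |x - y| = t := hm.mpr (Or.inl h1)
        rw [if_pos hmx]
        subst h1
        have hne : ¬ ((x + t) = (x - t)) := by omega
        simp [List.count_cons]
        simp [h2]
        ring
      · have hmx : |x - y| = t := hm.mpr (Or.inr h2)
        rw [if_pos hmx]
        subst h2
        have hne : ¬ ((x - t) = (x + t)) := by omega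
        simp [List.count_cons]
        simp [h1]
        ring
      · have hmx : ¬ (|x - y| = t) := fun h => by rcases hm.mp h with h' | h' <;> omega
        rw [if_neg hmx]
        have hne1 : ¬ ((x - t) = y) := fun h => h1 h.symm
        have hne2 : ¬ ((x + t) = y) := fun h => h2 h.symm
        simp [List.count_cons]
        simp [h1, h2]

-- ===== A-side: the nested fold computes pvF =====

theorem inner_loop_eq (nums : List Int) (t : Int) (former : Int)
    (h0 : 0 ≤ former) :
    (PySem.List.pyRange (former + 1) (nums.length : Int) 1).foldl
      (fun cnt latter =>
        if |PySem.List.pyGetD nums former 0 - PySem.List.pyGetD nums latter 0| = t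
        then cnt + 1 else cnt) init
    = init + pvCM t (PySem.List.pyGetD nums former 0) (nums.drop (former + 1).toNat) := by
  rw [PySem.List.foldl_pyRange_pyGetD' nums 0
        (fun acc y => if |PySem.List.pyGetD nums former 0 - y| = t then acc + 1 else acc)
        init (by omega : (0:Int) ≤ former + 1)]
  exact foldl_count t (PySem.List.pyGetD nums former 0) _ init

theorem outer_loop_eq (nums : List Int) (t : Int) :
    ∀ (n : ℕ) (a init : Int), 0 ≤ a → a + n = (nums.length : Int) →
    (PySem.List.pyRange a (nums.length : Int) 1).foldl
      (fun cnt former =>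
        (PySem.List.pyRange (former + 1) (nums.length : Int) 1).foldl
          (fun cnt latter =>
            if |PySem.List.pyGetD nums former 0 - PySem.List.pyGetD nums latter 0| = t
            then cnt + 1 else cnt) cnt) init
    = init + pvF t (nums.drop a.toNat) := by
  intro n
  induction n with
  | zero =>
    intro a init h0 hn
    rw [PySem.List.pyRange_one_eq_nil (by omega)]
    simp only [List.foldl_nil]
    rw [List.drop_eq_nil_of_le (by omega)]
    simp [pvF]
  | succ m ih =>
    intro a init h0 hn
    rw [PySem.List.pyRange_one_cons (by omega)]
    simp only [List.foldl_cons]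
    rw [inner_loop_eq nums t a h0, ih (a + 1) _ (by omega) (by omega)]
    have hlt : a.toNat < nums.length := by omega
    have hdrop : nums.drop a.toNat = nums[a.toNat] :: nums.drop (a.toNat + 1) := by
      exact (List.drop_eq_getElem_cons hlt)
    have hget : PySem.List.pyGetD nums a 0 = nums[a.toNat] := by
      rw [PySem.List.pyGetD_of_nonneg nums 0 h0]
      exact List.getD_eq_getElem nums 0 hlt
    have htn : (a + 1).toNat = a.toNat + 1 := by omega
    rw [hdrop, htn]
    simp only [pvF, hget]
    ring

theorem A_eq_pvF (nums : List Int) (t : Int) : k_difference nums t = pvF t nums := by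
  by_cases h : (nums.length : Int) < 2
  · simp only [k_difference, if_pos h]
    match nums, h with
    | [], _ => rfl
    | [x], _ => simp [pvF, pvCM]
    | x :: y :: rest, h => simp at h; omega
  · simp only [k_difference, if_neg h]
    rw [not_lt] at h
    have hlen : (2:Int) ≤ (nums.length : Int) := h
    -- extend the outer range from len-1 to len: the last index contributes 0
    have hsplit : PySem.List.pyRange 0 (nums.length : Int) 1
        = PySem.List.pyRange 0 ((nums.length : Int) - 1) 1 ++ [(nums.length : Int) - 1] := by
      have := PySem.List.pyRange_one_succ_right (a := 0) (b := (nums.length : Int) - 1) (by omega)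
      simpa [sub_add_cancel] using this
    have hfull := outer_loop_eq nums t nums.length 0 0 (by omega) (by omega)
    rw [hsplit] at hfull
    simp only [List.foldl_append, List.foldl_cons, List.foldl_nil] at hfull
    rw [inner_loop_eq nums t ((nums.length : Int) - 1) (by omega)] at hfull
    have hnil : nums.drop ((nums.length : Int) - 1 + 1).toNat = [] := by
      apply List.drop_eq_nil_of_le; omega
    rw [hnil, pvCM_nil] at hfull
    simpa using hfull

-- ===== B-side: the single pass computes pvF =====

theorem B_inv (t : Int) (ht : 0 ≤ t) :
    ∀ (p s : List Int) (c : Int),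
    (p.foldl
      (fun (st : PySem.Dict Int Int × Int) x =>
        let cnt := st.2 +
          (if t = 0 then st.1.getD x 0
           else st.1.getD (x - t) 0 + st.1.getD (x + t) 0)
        (st.1.insert x (st.1.getD x 0 + 1), cnt))
      (PySem.Dict.counter s, c)).2 = c + (pvF t (s ++ p) - pvF t s) := by
  intro p
  induction p with
  | nil => intro s c; simp
  | cons x xs ih =>
    intro s c
    simp only [List.foldl_cons]
    have hstep : (PySem.Dict.counter s).insert x ((PySem.Dict.counter s).getD x 0 + 1)
        = PySem.Dict.counter (s ++ [x]) := by
      rw [PySem.Dict.counter_append_singleton]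
      simp [PySem.Dict.modify]
    have hincr : (if t = 0 then (PySem.Dict.counter s).getD x 0
        else (PySem.Dict.counter s).getD (x - t) 0 + (PySem.Dict.counter s).getD (x + t) 0)
        = pvCM t x s := by
      rw [count_decompose t x s ht]
      by_cases h0 : t = 0 <;> simp [h0, PySem.Dict.getD_counter]
    simp only [hstep, hincr]
    rw [ih (s ++ [x]) _]
    rw [pvF_append_singleton]
    have : (s ++ [x]) ++ xs = s ++ x :: xs := by simp
    rw [this]
    ring

theorem B_eq_pvF (nums : List Int) (t : Int) : k_difference_alt nums t = pvF t nums := by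
  by_cases h : t < 0
  · simp only [k_difference_alt, if_pos h]
    exact (pvF_neg t nums h).symm
  · rw [not_lt] at h
    simp only [k_difference_alt, if_neg (not_lt.mpr h)]
    have hc : (PySem.Dict.empty : PySem.Dict Int Int) = PySem.Dict.counter [] := rfl
    rw [hc, B_inv t h nums [] 0]
    simp [pvF]

-- ===== VERDICT (by name: the statement is the Claim_ definition above) =====
theorem k_difference_spec : Claim_equal_k_difference := by
  intro nums target _
  unfold Spec_k_difference
  rw [A_eq_pvF, B_eq_pvF]
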